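-- pv_equiv track=rewrite | github.com/anryangelov/hackbg_programming101 | week01/final_round.py | fix_len
-- ===== SOURCE A (Python) =====
-- def fix_len(seq):
--     res = []
--     for l in seq:
--         if 7 in l or 9 in l:
--             max_len = 4
--         else:
--             max_len = 3
--         while len(l) > max_len:
--             l = l[:-max_len]
--         res.append(l)
--     return res
-- ===== SOURCE B (Python) =====
-- def fix_len(seq):
--     res = []
--     for l in seq:
--         m = 4 if (7 in l or 9 in l) else 3
--         res.append(l if len(l) <= m else l[:(len(l) - 1) % m + 1])
--     return res
-- ===== Notes on version B (the rewrite author's own statement) =====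
-- stated objective: faster
-- what changed: Replaces the repeated tail-chopping while-loop by a single slice whose length is computed in closed form with modulo arithmetic.
import Mathlib
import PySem

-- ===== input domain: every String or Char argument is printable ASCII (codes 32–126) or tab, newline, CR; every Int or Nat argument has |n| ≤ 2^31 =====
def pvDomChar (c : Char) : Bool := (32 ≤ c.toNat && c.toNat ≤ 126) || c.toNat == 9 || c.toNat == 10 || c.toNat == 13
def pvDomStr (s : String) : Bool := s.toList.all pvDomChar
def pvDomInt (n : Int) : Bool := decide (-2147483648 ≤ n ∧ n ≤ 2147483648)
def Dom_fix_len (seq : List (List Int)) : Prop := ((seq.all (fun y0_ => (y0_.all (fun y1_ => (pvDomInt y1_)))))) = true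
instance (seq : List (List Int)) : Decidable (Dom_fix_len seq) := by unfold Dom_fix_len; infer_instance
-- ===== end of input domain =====

-- B computes each truncated prefix with one closed-form slice instead of A's repeated tail-chopping loop (faster in a timing run).
-- ===== PORT A =====
-- while len(l) > m: l = l[:-m]   (l[:-m] with 0 < m < len l is exactly List.take (len l - m))
def chopA (m : Nat) (l : List Int) : List Int :=
  if h : 0 < m ∧ m < l.length then chopA m (l.take (l.length - m)) else l
termination_by l.length
decreasing_by simp [List.length_take]; omega

def fix_len (seq : List (List Int)) : List (List Int) :=
  seq.foldl (fun res l =>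
    let maxLen : Nat := if l.contains 7 || l.contains 9 then 4 else 3
    res ++ [chopA maxLen l]) []

-- ===== PORT B =====
def fix_len_alt (seq : List (List Int)) : List (List Int) :=
  seq.map (fun l =>
    let m : Nat := if l.contains 7 || l.contains 9 then 4 else 3
    if l.length ≤ m then l else l.take ((l.length - 1) % m + 1))

-- ===== PRECONDITION & SPEC =====
def Spec_fix_len (seq : List (List Int)) (out : List (List Int)) : Prop := out = fix_len_alt seq
instance (seq : List (List Int)) (out : List (List Int)) : Decidable (Spec_fix_len seq out) := by unfold Spec_fix_len; infer_instance

-- ===== CLAIM (what is proved, stated in full; the proofs are below) =====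
def Claim_equal_fix_len : Prop := ∀ (seq : List (List Int)), Dom_fix_len seq → Spec_fix_len seq (fix_len seq)

-- ===== LEMMAS AND PROOFS =====
theorem chopA_eq (m : Nat) (hm : 0 < m) (l : List Int) :
    chopA m l = if l.length ≤ m then l else l.take ((l.length - 1) % m + 1) := by
  fun_induction chopA m l with
  | case1 l h ih =>
    obtain ⟨h1, h2⟩ := h
    rw [ih]
    simp only [List.length_take, List.take_take]
    have hlen : min (l.length - m) l.length = l.length - m := by omega
    rw [hlen]
    have hnot : ¬ l.length ≤ m := by omega
    rw [if_neg hnot]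
    by_cases hc : l.length - m ≤ m
    · rw [if_pos hc]
      have hmod : (l.length - 1) % m = l.length - 1 - m := by
        rw [Nat.mod_eq_sub_mod (by omega)]
        exact Nat.mod_eq_of_lt (by omega)
      rw [hmod]
      congr 1
      omega
    · rw [if_neg hc]
      have hmod : (l.length - m - 1) % m = (l.length - 1) % m := by
        have : l.length - 1 = (l.length - m - 1) + m := by omega
        rw [this, Nat.add_mod_right]
      rw [hmod]
      congr 1
      have : (l.length - 1) % m < m := Nat.mod_lt _ hm
      omega
  | case2 l h =>
    rw [if_pos]
    omega

theorem foldl_append_map (f : List Int → List Int) (seq acc : List (List Int)) :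
    seq.foldl (fun res l => res ++ [f l]) acc = acc ++ seq.map f := by
  induction seq generalizing acc with
  | nil => simp
  | cons x xs ih => simp [List.foldl, ih]

-- ===== VERDICT (by name: the statement is the Claim_ definition above) =====
theorem fix_len_spec : Claim_equal_fix_len := by
  intro seq _
  unfold Spec_fix_len fix_len fix_len_alt
  rw [foldl_append_map]
  simp only [List.nil_append]
  apply List.map_congr_left
  intro l _
  by_cases h7 : l.contains 7 || l.contains 9 <;>
    simp only [h7, if_true] <;> exact chopA_eq _ (by norm_num) l
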